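-- pv_equiv track=rewrite | github.com/BuilderBenv1/brain-v | scripts/test_brady_gallows_and_ab.py | to_skeleton
-- ===== SOURCE A (Python) =====
-- EVA_MAP = [
--     # Order matters: longer sequences first
--     ("cth", "tk"),    # bench gallows mid-word
--     ("ckh", "kk"),
--     ("cph", "pk"),
--     ("ch",  "k"),     # kaph/qoph merged
--     ("sh",  "s"),     # š -> s  (we treat sheen as s for matching)
--     ("k",   "k"),
--     ("d",   "d"),
--     ("r",   "r"),
--     ("s",   "s"),
--     ("l",   "l"),
--     ("n",   "n"),
--     ("y",   "y"),
--     ("m",   "m"),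
--     ("g",   "g"),
--     ("t",   "t"),     # gallows but we include; optional strip below
--     ("p",   "p"),
--     ("f",   "s"),     # tsade -> s (approx)
--     ("q",   "w"),
--     # vowels dropped
-- ]
--
-- VOWELS = set("aoei")
--
-- def to_skeleton(word, strip_plain_gallows=True):
--     """Apply Brady's EVA->Syriac char map with vowel stripping."""
--     # Optionally strip a leading plain gallows if present (paragraph marker rule)
--     if strip_plain_gallows and word and word[0] in "tp":
--         # Only strip if NOT followed by a bench gallows sequence start
--         # (crude: if next char is not 'h' or end)
--         if len(word) == 1 or word[1] not in "h":
--             word = word[1:]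
--     out = []
--     i = 0
--     while i < len(word):
--         matched = False
--         for ev, sy in EVA_MAP:
--             if word.startswith(ev, i):
--                 if sy:
--                     out.append(sy)
--                 i += len(ev)
--                 matched = True
--                 break
--         if not matched:
--             if word[i] in VOWELS:
--                 i += 1
--             else:
--                 # unknown char -> skip
--                 i += 1
--     return "".join(out)
-- ===== SOURCE B (Python) =====
-- SINGLE = {
--     "k": "k", "d": "d", "r": "r", "s": "s", "l": "l", "n": "n",
--     "y": "y", "m": "m", "g": "g", "t": "t", "p": "p", "f": "s", "q": "w",
-- }
-- CLUSTER = {"th": "tk", "kh": "kk", "ph": "pk"}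
--
-- def to_skeleton(word, strip_plain_gallows=True):
--     """EVA->Syriac skeleton: char-at-a-time scan with explicit lookahead on 'c'."""
--     if strip_plain_gallows and word[:1] in ("t", "p") and word[1:2] != "h":
--         word = word[1:]
--     out = []
--     i = 0
--     n = len(word)
--     while i < n:
--         ch = word[i]
--         if ch == "c":
--             pair = word[i + 1:i + 3]
--             if pair in CLUSTER:
--                 out.append(CLUSTER[pair])
--                 i += 3
--             elif word[i + 1:i + 2] == "h":
--                 out.append("k")
--                 i += 2
--             else:
--                 i += 1
--         else:
--             out.append(SINGLE.get(ch, ""))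
--             i += 1
--     return "".join(out)
-- ===== Notes on version B (the rewrite author's own statement) =====
-- stated objective: faster
-- what changed: Replaces the while-loop that rescans the 19-entry EVA_MAP table at every position with a single left-to-right pass using a one-character dict plus an explicit two-character lookahead after a bench-cluster opener (the sh entry is redundant: its two halves map to the same output).
import Mathlib
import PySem

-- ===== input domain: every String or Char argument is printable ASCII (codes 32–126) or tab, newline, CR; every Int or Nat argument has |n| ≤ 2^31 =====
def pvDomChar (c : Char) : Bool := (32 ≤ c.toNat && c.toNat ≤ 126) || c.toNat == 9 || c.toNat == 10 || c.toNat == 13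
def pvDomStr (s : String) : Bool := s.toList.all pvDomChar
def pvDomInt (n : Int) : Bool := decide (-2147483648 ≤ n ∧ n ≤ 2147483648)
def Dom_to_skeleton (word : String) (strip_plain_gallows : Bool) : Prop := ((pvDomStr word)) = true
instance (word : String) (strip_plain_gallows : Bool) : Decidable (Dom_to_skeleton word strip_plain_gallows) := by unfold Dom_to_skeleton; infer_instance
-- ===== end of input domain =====

-- B replaces A's per-position scan of the 19-entry EVA table by a single-char map with an
-- explicit lookahead after a bench-cluster opener (objective: faster; measured).

-- ===== PORT A =====
-- the EVA_MAP table, in the original order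
def evaMap : List (List Char × List Char) :=
  [ (['c','t','h'], ['t','k']), (['c','k','h'], ['k','k']), (['c','p','h'], ['p','k']),
    (['c','h'], ['k']), (['s','h'], ['s']),
    (['k'], ['k']), (['d'], ['d']), (['r'], ['r']), (['s'], ['s']), (['l'], ['l']),
    (['n'], ['n']), (['y'], ['y']), (['m'], ['m']), (['g'], ['g']), (['t'], ['t']),
    (['p'], ['p']), (['f'], ['s']), (['q'], ['w']) ]

-- word.startswith(ev, i): ev is a prefix of the suffix of word at position i
def aStarts : List Char → List Char → Bool
  | [], _ => true
  | _ :: _, [] => false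
  | p :: ps, x :: xs => p == x && aStarts ps xs

-- the inner `for ev, sy in EVA_MAP: … break`: first entry matching at the current position
def aFind : List (List Char × List Char) → List Char → Option (List Char × Nat)
  | [], _ => none
  | (ev, sy) :: rest, s => if aStarts ev s then some (sy, ev.length) else aFind rest s

-- the while loop; the current position i is represented by the remaining suffix of word
def aLoop : Nat → List Char → List Char
  | 0, _ => []
  | fuel + 1, s =>
    if s.isEmpty then []
    else
      match aFind evaMap s with
      | some (sy, n) => (if sy.isEmpty then [] else sy) ++ aLoop fuel (s.drop n)
      | none =>
        -- vowel or unknown char: both branches of A advance one position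
        if s.headD ' ' ∈ ['a', 'o', 'e', 'i'] then aLoop fuel (s.drop 1)
        else aLoop fuel (s.drop 1)

def aStrip (w : List Char) (strip : Bool) : List Char :=
  if strip then
    match w with
    | [] => []
    | a :: rest =>
      if a = 't' ∨ a = 'p' then
        match rest with
        | [] => rest
        | b :: _ => if b ≠ 'h' then rest else w
      else w
  else w

def to_skeleton (word : String) (strip_plain_gallows : Bool) : String :=
  String.ofList (aLoop (aStrip word.toList strip_plain_gallows).length
                       (aStrip word.toList strip_plain_gallows))

-- ===== PORT B =====
def bSingle (c : Char) : List Char :=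
  match c with
  | 'k' => ['k'] | 'd' => ['d'] | 'r' => ['r'] | 's' => ['s'] | 'l' => ['l']
  | 'n' => ['n'] | 'y' => ['y'] | 'm' => ['m'] | 'g' => ['g'] | 't' => ['t']
  | 'p' => ['p'] | 'f' => ['s'] | 'q' => ['w'] | _ => []

def bCluster : List Char → Option (List Char)
  | ['t', 'h'] => some ['t', 'k']
  | ['k', 'h'] => some ['k', 'k']
  | ['p', 'h'] => some ['p', 'k']
  | _ => none

def bGo (s : List Char) : List Char :=
  match s with
  | [] => []
  | a :: rest =>
    if a = 'c' then
      match bCluster (rest.take 2) with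
      | some v => v ++ bGo (rest.drop 2)
      | none =>
        if rest.take 1 = ['h'] then 'k' :: bGo (rest.drop 1)
        else bGo rest
    else bSingle a ++ bGo rest
termination_by s.length
decreasing_by all_goals (simp [List.length_drop]; try omega)

def bStrip (w : List Char) (strip : Bool) : List Char :=
  if strip then
    match w with
    | a :: b :: rest => if (a = 't' ∨ a = 'p') ∧ b ≠ 'h' then b :: rest else w
    | [a] => if a = 't' ∨ a = 'p' then [] else w
    | [] => []
  else w

def to_skeleton_alt (word : String) (strip_plain_gallows : Bool) : String :=
  String.ofList (bGo (bStrip word.toList strip_plain_gallows))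

-- ===== PRECONDITION & SPEC =====
def Spec_to_skeleton (word : String) (strip_plain_gallows : Bool) (out : String) : Prop := out = to_skeleton_alt word strip_plain_gallows
instance (word : String) (strip_plain_gallows : Bool) (out : String) : Decidable (Spec_to_skeleton word strip_plain_gallows out) := by unfold Spec_to_skeleton; infer_instance

-- ===== CLAIM (what is proved, stated in full; the proofs are below) =====
def Claim_equal_to_skeleton : Prop := ∀ (word : String) (strip_plain_gallows : Bool), Dom_to_skeleton word strip_plain_gallows → Spec_to_skeleton word strip_plain_gallows (to_skeleton word strip_plain_gallows)

-- ===== LEMMAS AND PROOFS =====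

lemma bCluster_none (x : Char) (xs : List Char) (h1 : x ≠ 't') (h2 : x ≠ 'k') (h3 : x ≠ 'p') :
    bCluster (x :: xs) = none := by
  cases xs with
  | nil => simp [bCluster]
  | cons y ys => cases ys <;> simp [bCluster, h1, h2, h3]

-- a head that is neither 'c' nor 's': table scan degenerates to the single-char map
lemma step_other (fuel : Nat) (a : Char) (rest : List Char) (hc : a ≠ 'c') (hs : a ≠ 's') :
    aLoop (fuel + 1) (a :: rest) = bSingle a ++ aLoop fuel rest := by
  by_cases h1 : a = 'k'; · subst h1; simp [aLoop, aFind, evaMap, aStarts, bSingle]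
  by_cases h2 : a = 'd'; · subst h2; simp [aLoop, aFind, evaMap, aStarts, bSingle]
  by_cases h3 : a = 'r'; · subst h3; simp [aLoop, aFind, evaMap, aStarts, bSingle]
  by_cases h4 : a = 'l'; · subst h4; simp [aLoop, aFind, evaMap, aStarts, bSingle]
  by_cases h5 : a = 'n'; · subst h5; simp [aLoop, aFind, evaMap, aStarts, bSingle]
  by_cases h6 : a = 'y'; · subst h6; simp [aLoop, aFind, evaMap, aStarts, bSingle]
  by_cases h7 : a = 'm'; · subst h7; simp [aLoop, aFind, evaMap, aStarts, bSingle]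
  by_cases h8 : a = 'g'; · subst h8; simp [aLoop, aFind, evaMap, aStarts, bSingle]
  by_cases h9 : a = 't'; · subst h9; simp [aLoop, aFind, evaMap, aStarts, bSingle]
  by_cases h10 : a = 'p'; · subst h10; simp [aLoop, aFind, evaMap, aStarts, bSingle]
  by_cases h11 : a = 'f'; · subst h11; simp [aLoop, aFind, evaMap, aStarts, bSingle]
  by_cases h12 : a = 'q'; · subst h12; simp [aLoop, aFind, evaMap, aStarts, bSingle]
  simp [aLoop, aFind, evaMap, aStarts, bSingle, Ne.symm hc, Ne.symm hs,
    Ne.symm h1, Ne.symm h2, Ne.symm h3, Ne.symm h4, Ne.symm h5, Ne.symm h6,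
    Ne.symm h7, Ne.symm h8, Ne.symm h9, Ne.symm h10, Ne.symm h11, Ne.symm h12, ite_self]

lemma aLoop_nil (fuel : Nat) : aLoop fuel [] = [] := by
  cases fuel <;> simp [aLoop]

lemma aLoop_eq_bGo : ∀ (fuel : Nat) (s : List Char), s.length ≤ fuel → aLoop fuel s = bGo s := by
  intro fuel
  induction fuel with
  | zero =>
    intro s h
    have hs : s = [] := List.eq_nil_of_length_eq_zero (Nat.le_zero.mp h)
    subst hs; simp [aLoop, bGo]
  | succ fuel ih =>
    intro s h
    match s with
    | [] => simp [aLoop, bGo]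
    | a :: rest =>
      have h' : rest.length ≤ fuel := by simp [List.length_cons] at h; omega
      by_cases hc : a = 'c'
      · subst hc
        match rest with
        | [] => simp [aLoop, bGo, aFind, evaMap, aStarts, bCluster, aLoop_nil]
        | b :: rest2 =>
          have h2 : rest2.length ≤ fuel := by simp [List.length_cons] at h'; omega
          by_cases hb : b = 'h'
          · subst hb
            simp [aLoop, bGo, aFind, evaMap, aStarts,
              bCluster_none 'h' _ (by decide) (by decide) (by decide), ih rest2 h2]
          · by_cases ht : b = 't'
            · subst ht
              match rest2 with
              | [] => simp [aLoop, bGo, aFind, evaMap, aStarts, bCluster, ih _ h']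
              | d :: rest3 =>
                have h3 : rest3.length ≤ fuel := by simp [List.length_cons] at h2; omega
                by_cases hd : d = 'h'
                · subst hd; simp [aLoop, bGo, aFind, evaMap, aStarts, bCluster, ih rest3 h3]
                · simp [aLoop, bGo, aFind, evaMap, aStarts, bCluster, hd, Ne.symm hd, ih _ h']
            · by_cases hk : b = 'k'
              · subst hk
                match rest2 with
                | [] => simp [aLoop, bGo, aFind, evaMap, aStarts, bCluster, ih _ h']
                | d :: rest3 =>
                  have h3 : rest3.length ≤ fuel := by simp [List.length_cons] at h2; omega
                  by_cases hd : d = 'h'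
                  · subst hd; simp [aLoop, bGo, aFind, evaMap, aStarts, bCluster, ih rest3 h3]
                  · simp [aLoop, bGo, aFind, evaMap, aStarts, bCluster, hd, Ne.symm hd, ih _ h']
              · by_cases hp : b = 'p'
                · subst hp
                  match rest2 with
                  | [] => simp [aLoop, bGo, aFind, evaMap, aStarts, bCluster, ih _ h']
                  | d :: rest3 =>
                    have h3 : rest3.length ≤ fuel := by simp [List.length_cons] at h2; omega
                    by_cases hd : d = 'h'
                    · subst hd; simp [aLoop, bGo, aFind, evaMap, aStarts, bCluster, ih rest3 h3]
                    · simp [aLoop, bGo, aFind, evaMap, aStarts, bCluster, hd, Ne.symm hd, ih _ h']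
                · simp [aLoop, bGo, aFind, evaMap, aStarts,
                    bCluster_none b _ ht hk hp, hb, Ne.symm hb, Ne.symm ht, Ne.symm hk, Ne.symm hp,
                    ih _ h']
      · by_cases hs : a = 's'
        · subst hs
          match rest with
          | [] => simp [aLoop, bGo, aFind, evaMap, aStarts, bSingle, aLoop_nil]
          | b :: rest2 =>
            have h2 : rest2.length ≤ fuel := by simp [List.length_cons] at h'; omega
            by_cases hb : b = 'h'
            · subst hb
              simp [aLoop, bGo, aFind, evaMap, aStarts, bSingle, ih rest2 h2]
            · simp [aLoop, bGo, aFind, evaMap, aStarts, bSingle, Ne.symm hb, ih _ h']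
        · rw [step_other fuel a rest hc hs, ih rest h']
          rw [bGo]; simp [hc]

lemma strip_eq (w : List Char) (b : Bool) : aStrip w b = bStrip w b := by
  cases b <;> rcases w with _ | ⟨a, _ | ⟨c, t⟩⟩ <;> simp [aStrip, bStrip]
  all_goals (split_ifs <;> simp_all)

-- ===== VERDICT (by name: the statement is the Claim_ definition above) =====
theorem to_skeleton_spec : Claim_equal_to_skeleton := by
  intro word g _
  unfold Spec_to_skeleton to_skeleton to_skeleton_alt
  rw [strip_eq, aLoop_eq_bGo _ _ le_rfl]
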